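-- pv_equiv track=rewrite | github.com/ngreenwald89/anagram-solver | toms_way.py | contains_all
-- ===== SOURCE A (Python) =====
-- def contains_all(sword):
-- 	sorted_anagram = ['a', 'i', 'l', 'n', 'o', 'o', 'p', 'r', 's', 's', 't', 't', 't', 't', 'u', 'u', 'w', 'y']
-- 	for char in sword:
-- 		if char not in sorted_anagram:
-- 			return False
-- 		else:
-- 			sorted_anagram.remove(char)
-- 	return True
-- ===== SOURCE B (Python) =====
-- def contains_all(sword):
--     allowed = {'a': 1, 'i': 1, 'l': 1, 'n': 1, 'o': 2, 'p': 1,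
--                'r': 1, 's': 2, 't': 4, 'u': 2, 'w': 1, 'y': 1}
--     freq = {}
--     for ch in sword:
--         freq[ch] = freq.get(ch, 0) + 1
--     for ch, n in freq.items():
--         if n > allowed.get(ch, 0):
--             return False
--     return True
-- ===== Notes on version B (the rewrite author's own statement) =====
-- stated objective: idiomatic
-- what changed: Replaces the per-character membership-test-and-remove consumption of a mutable letter list with a single aggregation pass building a frequency table, followed by one comparison pass of grouped counts against a fixed count table.
import Mathlib
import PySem

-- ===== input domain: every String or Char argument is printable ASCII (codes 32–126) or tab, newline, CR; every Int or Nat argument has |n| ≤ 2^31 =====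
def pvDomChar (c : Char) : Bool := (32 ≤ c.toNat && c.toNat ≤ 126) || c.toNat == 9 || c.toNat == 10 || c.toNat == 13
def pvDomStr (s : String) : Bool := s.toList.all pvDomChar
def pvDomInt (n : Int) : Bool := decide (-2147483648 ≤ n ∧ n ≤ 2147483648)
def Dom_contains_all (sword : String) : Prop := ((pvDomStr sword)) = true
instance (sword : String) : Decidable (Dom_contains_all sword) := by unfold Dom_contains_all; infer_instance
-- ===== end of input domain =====

-- B replaces A's per-character membership-and-remove consume loop with an aggregate
-- frequency table compared once against a fixed count table (idiomatic).

-- ===== PORT A =====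
-- the mutable list sorted_anagram and the consume loop of A, as structural recursion
def contains_all_loop : List Char → List Char → Bool
  | [], _ => true
  | c :: rest, avail =>
    if c ∈ avail then contains_all_loop rest (avail.erase c) else false

def contains_all (sword : String) : Bool :=
  contains_all_loop sword.toList
    ['a', 'i', 'l', 'n', 'o', 'o', 'p', 'r', 's', 's', 't', 't', 't', 't', 'u', 'u', 'w', 'y']

-- ===== PORT B =====
def contains_all_allowed : PySem.Dict Char Int :=
  PySem.Dict.ofList [('a', 1), ('i', 1), ('l', 1), ('n', 1), ('o', 2), ('p', 1),
                     ('r', 1), ('s', 2), ('t', 4), ('u', 2), ('w', 1), ('y', 1)]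

def contains_all_alt (sword : String) : Bool :=
  (sword.toList.foldl (fun d ch => d.insert ch (d.getD ch 0 + 1)) PySem.Dict.empty).items.all
    (fun p => !(decide (p.2 > contains_all_allowed.getD p.1 0)))

-- ===== PRECONDITION & SPEC =====
def Spec_contains_all (sword : String) (out : Bool) : Prop := out = contains_all_alt sword
instance (sword : String) (out : Bool) : Decidable (Spec_contains_all sword out) := by unfold Spec_contains_all; infer_instance

-- ===== CLAIM (what is proved, stated in full; the proofs are below) =====
def Claim_equal_contains_all : Prop := ∀ (sword : String), Dom_contains_all sword → Spec_contains_all sword (contains_all sword)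

-- ===== LEMMAS AND PROOFS =====

-- A's consume loop succeeds iff every letter's multiplicity fits in the available pool
theorem contains_all_loop_iff (cs avail : List Char) :
    contains_all_loop cs avail = true ↔ ∀ c, cs.count c ≤ avail.count c := by
  induction cs generalizing avail with
  | nil => simp [contains_all_loop]
  | cons c rest ih =>
    simp only [contains_all_loop]
    by_cases h : c ∈ avail
    · simp only [h, if_true, ih]
      have hpos : 1 ≤ avail.count c := List.one_le_count_iff.mpr h
      constructor
      · intro H d
        have hd := H d
        rw [List.count_erase] at hd
        rw [List.count_cons]
        by_cases h2 : c = d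
        · subst h2; simp at hd ⊢; omega
        · simp [h2] at hd ⊢; omega
      · intro H d
        have hd := H d
        rw [List.count_cons] at hd
        rw [List.count_erase]
        by_cases h2 : c = d
        · subst h2; simp at hd ⊢; omega
        · simp [h2] at hd ⊢; omega
    · simp only [h, if_false]
      constructor
      · intro hx; exact absurd hx (by simp)
      · intro H
        have hd := H c
        have h0 : avail.count c = 0 := List.count_eq_zero_of_not_mem h
        rw [List.count_cons] at hd
        simp [h0] at hd

-- the fixed count table agrees pointwise with the multiset A consumes
set_option maxHeartbeats 1000000 in
theorem contains_all_bound (c : Char) :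
    contains_all_allowed.getD c 0 =
      ((['a', 'i', 'l', 'n', 'o', 'o', 'p', 'r', 's', 's', 't', 't', 't', 't', 'u', 'u', 'w', 'y'] : List Char).count c : Int) := by
  have h : contains_all_allowed = PySem.Dict.mk [('a', 1), ('i', 1), ('l', 1), ('n', 1),
      ('o', 2), ('p', 1), ('r', 1), ('s', 2), ('t', 4), ('u', 2), ('w', 1), ('y', 1)] := by decide
  rw [h, PySem.Dict.getD_eq_get?_getD]
  simp only [PySem.Dict.get?_mk_cons, beq_iff_eq]
  split_ifs with h1 h2 h3 h4 h5 h6 h7 h8 h9 h10 h11 h12 <;> subst_eqs <;>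
    first
      | decide
      | (rw [List.count_eq_zero_of_not_mem (fun hm => by
            simp only [List.mem_cons, List.not_mem_nil, or_false] at hm
            rcases hm with h|h|h|h|h|h|h|h|h|h|h|h|h|h|h|h|h|h <;> subst h <;> simp_all)]; rfl)

theorem contains_all_alt_iff (s : String) :
    contains_all_alt s = true ↔
      ∀ c ∈ s.toList, (s.toList.count c : Int) ≤ contains_all_allowed.getD c 0 := by
  unfold contains_all_alt
  rw [PySem.Dict.foldl_insert_getD_add_one_eq_counter, PySem.Dict.items_counter]
  simp [List.all_map, List.all_eq_true, PySem.Set.mem_ofList]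

-- ===== VERDICT (by name: the statement is the Claim_ definition above) =====
theorem contains_all_spec : Claim_equal_contains_all := by
  intro sword _
  unfold Spec_contains_all
  have hA := contains_all_loop_iff sword.toList
    ['a', 'i', 'l', 'n', 'o', 'o', 'p', 'r', 's', 's', 't', 't', 't', 't', 'u', 'u', 'w', 'y']
  have hB := contains_all_alt_iff sword
  rw [Bool.eq_iff_iff]
  unfold contains_all
  rw [hA, hB]
  constructor
  · intro H c _
    rw [contains_all_bound]
    exact_mod_cast H c
  · intro H c
    by_cases hc : c ∈ sword.toList
    · have := H c hc
      rw [contains_all_bound] at this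
      exact_mod_cast this
    · simp [List.count_eq_zero_of_not_mem hc]
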